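-- pv_equiv track=rewrite | github.com/Xeo-hub/CryptoBank | cryptobank.py | get_after_slice
-- ===== SOURCE A (Python) =====
-- def get_after_slice(text):
--     encontrado = False
--     result = ""
--     for letra in text:
--         if (encontrado == True):
--             result += letra
--         if (letra == "/"):
--             encontrado = True
--     return result
-- ===== SOURCE B (Python) =====
-- def get_after_slice(text):
--     i = text.find('/')
--     return '' if i == -1 else text[i + 1:]
-- ===== Notes on version B (the rewrite author's own statement) =====
-- stated objective: idiomatic
-- what changed: Replaces the flag-gated character-append loop with a locate-then-slice two-phase computation: find the first slash with str.find, then return the slice after it (empty string when absent), avoiding quadratic string concatenation.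
import Mathlib
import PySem

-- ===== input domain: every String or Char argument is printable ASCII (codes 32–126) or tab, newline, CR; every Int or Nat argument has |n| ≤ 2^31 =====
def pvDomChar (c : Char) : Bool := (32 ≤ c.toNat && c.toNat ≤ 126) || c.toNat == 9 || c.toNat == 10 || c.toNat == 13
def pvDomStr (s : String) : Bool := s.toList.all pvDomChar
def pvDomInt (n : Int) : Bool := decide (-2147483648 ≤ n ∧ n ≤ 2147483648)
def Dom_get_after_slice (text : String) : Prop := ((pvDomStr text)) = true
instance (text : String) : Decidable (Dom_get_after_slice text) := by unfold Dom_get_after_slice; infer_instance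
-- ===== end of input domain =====

-- B replaces A's flag-gated character-append loop with locate-then-slice (idiomatic); same return value.
-- ===== PORT A =====
-- A-side helper: one iteration of A's for-loop (state = (encontrado, result))
def pvStep : Bool × List Char → Char → Bool × List Char :=
  fun st letra =>
    let result := if st.1 = true then st.2 ++ [letra] else st.2
    let encontrado := if letra = '/' then true else st.1
    (encontrado, result)

def get_after_slice (text : String) : String :=
  let st := text.toList.foldl pvStep (false, [])
  String.ofList st.2

-- ===== PORT B =====
def get_after_slice_alt (text : String) : String :=
  let i := PySem.Str.find text "/"
  if i = -1 then "" else PySem.Str.slice text (some (i + 1)) none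

-- ===== PRECONDITION & SPEC =====
def Spec_get_after_slice (text : String) (out : String) : Prop := out = get_after_slice_alt text
instance (text : String) (out : String) : Decidable (Spec_get_after_slice text out) := by unfold Spec_get_after_slice; infer_instance

-- ===== CLAIM (what is proved, stated in full; the proofs are below) =====
def Claim_equal_get_after_slice : Prop := ∀ (text : String), Dom_get_after_slice text → Spec_get_after_slice text (get_after_slice text)

-- ===== LEMMAS AND PROOFS =====

-- the value A's loop computes: the suffix after the first '/'
def afterSlash : List Char → List Char
  | [] => []
  | c :: cs => if c = '/' then cs else afterSlash cs

theorem foldl_true (l : List Char) (acc : List Char) :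
    l.foldl pvStep (true, acc) = (true, acc ++ l) := by
  induction l generalizing acc with
  | nil => simp
  | cons c cs ih => simp [pvStep, ih]

theorem foldl_false (l : List Char) (acc : List Char) :
    (l.foldl pvStep (false, acc)).2 = acc ++ afterSlash l := by
  induction l generalizing acc with
  | nil => simp [afterSlash]
  | cons c cs ih =>
    by_cases h : c = '/'
    · simp [pvStep, h, afterSlash, foldl_true]
    · simp [pvStep, h, afterSlash, ih]

theorem singleton_prefix {a : Char} {t : List Char} : [a] <+: t ↔ t.head? = some a := by
  cases t with
  | nil => simp
  | cons b bs =>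
    constructor
    · rintro ⟨r, hr⟩
      simp at hr
      simp [hr.1]
    · intro h
      simp at h
      exact ⟨bs, by simp [h]⟩

theorem afterSlash_of_not_mem {l : List Char} (h : '/' ∉ l) : afterSlash l = [] := by
  induction l with
  | nil => rfl
  | cons c cs ih =>
    simp only [List.mem_cons, not_or] at h
    have hc : c ≠ '/' := fun hc => h.1 hc.symm
    simp [afterSlash, hc, ih h.2]

theorem afterSlash_drop {l : List Char} {n : Nat}
    (hmin : ∀ j, j < n → l[j]? ≠ some '/') (hn : l[n]? = some '/') :
    afterSlash l = l.drop (n + 1) := by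
  induction l generalizing n with
  | nil => simp at hn
  | cons c cs ih =>
    cases n with
    | zero =>
      simp at hn
      simp [afterSlash, hn]
    | succ m =>
      have h0 := hmin 0 (Nat.succ_pos m)
      simp at h0
      simp [afterSlash, h0]
      exact ih (fun j hj => by simpa using hmin (j + 1) (by omega)) (by simpa using hn)

-- ===== VERDICT (by name: the statement is the Claim_ definition above) =====
theorem get_after_slice_spec : Claim_equal_get_after_slice := by
  intro text _
  unfold Spec_get_after_slice get_after_slice get_after_slice_alt
  simp only [foldl_false, List.nil_append]
  set l := text.toList with hl
  by_cases h : ('/' : Char) ∈ l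
  · have hinf : ['/'] <:+: l := (by
      obtain ⟨s, t, hst⟩ := List.append_of_mem h
      exact ⟨s, t, by rw [hst]; simp⟩)
    have hne : PySem.Chars.find l ['/'] ≠ -1 := (PySem.Chars.find_ne_neg_one_iff l ['/']).2 hinf
    have hge : 0 ≤ PySem.Chars.find l ['/'] := (PySem.Chars.find_nonneg_iff l ['/']).2 hinf
    have hspec := PySem.Chars.find_spec (s := l) (sub := ['/']) hge
    set i := PySem.Chars.find l ['/'] with hi
    have hfind : PySem.Str.find text "/" = i := by
      simp [PySem.Str.find, ← hl, ← hi]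
    rw [hfind, if_neg hne]
    have hget : l[i.toNat]? = some '/' := by
      have := singleton_prefix.1 hspec.1
      simpa [List.head?_drop] using this
    have hmin : ∀ j, j < i.toNat → l[j]? ≠ some '/' := by
      intro j hj hc
      exact hspec.2 j hj (singleton_prefix.2 (by simpa [List.head?_drop] using hc))
    rw [afterSlash_drop hmin hget]
    have hslice : (PySem.Str.slice text (some (i + 1)) none).toList = l.drop (i.toNat + 1) := by
      rw [PySem.Str.toList_slice, ← hl, PySem.Chars.slice_eq_listSlice,
        PySem.List.slice_from l (by omega)]
      congr 1
      omega
    have hts : (String.ofList (l.drop (i.toNat + 1))).toList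
        = (PySem.Str.slice text (some (i + 1)) none).toList := by
      simp [hslice]
    exact String.toList_inj.1 hts
  · have hninf : ¬ ['/'] <:+: l := by
      intro hc
      exact h (hc.subset (by simp))
    have hfind : PySem.Str.find text "/" = -1 := by
      simpa [PySem.Str.find, ← hl] using (PySem.Chars.find_eq_neg_one_iff l ['/']).2 hninf
    rw [hfind, if_pos rfl, afterSlash_of_not_mem h]

-- ===== VERDICT (by name: the statement is the Claim_ definition above) =====
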